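-- pv_equiv track=rewrite | github.com/Arrttemka/MTRAN | eror_display.py | get_line_and_column
-- ===== SOURCE A (Python) =====
-- def get_line_and_column(text, position):
--     lines = text.splitlines()
--     line_start = 0
--     for i, line in enumerate(lines, start=1):
--         line_end = line_start + len(line)
--         if line_start <= position <= line_end:
--             column = position - line_start
--             return i, column
--         line_start = line_end + 1
--     return -1, -1
-- ===== SOURCE B (Python) =====
-- def get_line_and_column(text, position):
--     lines = text.splitlines()
--     # prefix table of line-start offsets (same len(line)+1 stride as the original)
--     starts = [0]
--     last = 0
--     for line in lines:
--         last += len(line) + 1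
--         starts.append(last)
--     # rightmost line index lo with starts[lo+1] <= position pushed past, i.e.
--     # least lo with position < starts[lo+1]
--     lo, hi = 0, len(lines)
--     while lo < hi:
--         mid = (lo + hi) // 2
--         if starts[mid + 1] <= position:
--             lo = mid + 1
--         else:
--             hi = mid
--     if lo < len(lines) and starts[lo] <= position <= starts[lo] + len(lines[lo]):
--         return lo + 1, position - starts[lo]
--     return -1, -1
-- ===== Notes on version B (the rewrite author's own statement) =====
-- stated objective: alternative
-- what changed: Replaces A's linear scan with running line_start by a prefix table of line-start offsets plus a binary search for the rightmost start <= position, with one bounds check at the end.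
import Mathlib
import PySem

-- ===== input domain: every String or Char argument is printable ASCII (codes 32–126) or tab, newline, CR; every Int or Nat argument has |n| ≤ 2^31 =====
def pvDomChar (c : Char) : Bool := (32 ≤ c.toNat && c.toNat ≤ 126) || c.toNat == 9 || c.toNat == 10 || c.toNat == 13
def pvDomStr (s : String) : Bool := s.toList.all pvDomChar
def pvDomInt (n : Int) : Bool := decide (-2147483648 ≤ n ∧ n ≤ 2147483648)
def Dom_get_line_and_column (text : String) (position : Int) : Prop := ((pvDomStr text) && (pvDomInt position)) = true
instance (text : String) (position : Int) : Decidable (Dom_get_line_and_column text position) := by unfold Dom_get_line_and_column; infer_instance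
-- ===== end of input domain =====

-- B replaces A's linear scan by a prefix table of line starts plus a binary search
-- (same splitlines / len(line)+1 stride, hence identical values everywhere).

-- ===== PORT A =====
-- the for-loop over enumerate(lines, start=1) with accumulator line_start
def pvALoop (position : Int) : List String → Int → Int → Int × Int
  | [], _, _ => (-1, -1)
  | line :: rest, i, line_start =>
      let line_end := line_start + (PySem.Str.len line : Int)
      if line_start ≤ position ∧ position ≤ line_end then (i, position - line_start)
      else pvALoop position rest (i + 1) (line_end + 1)

def get_line_and_column (text : String) (position : Int) : Int × Int :=
  pvALoop position (PySem.Str.splitlines text) 1 0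

-- ===== PORT B =====
-- the for-loop building the prefix table starts (with running last)
def pvBuild : List String → List Int → Int → List Int
  | [], starts, _ => starts
  | line :: rest, starts, last =>
      let last' := last + (PySem.Str.len line : Int) + 1
      pvBuild rest (starts ++ [last']) last'

-- the while-loop binary search: least lo with position < starts[lo+1] (hi if none)
def pvSearch (starts : List Int) (position : Int) (lo hi : Nat) : Nat :=
  if lo < hi then
    let mid := (lo + hi) / 2
    if PySem.List.pyGetD starts ((mid : Int) + 1) 0 ≤ position then
      pvSearch starts position (mid + 1) hi
    else
      pvSearch starts position lo mid
  else lo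
termination_by hi - lo
decreasing_by all_goals omega

def get_line_and_column_alt (text : String) (position : Int) : Int × Int :=
  let lines := PySem.Str.splitlines text
  let starts := pvBuild lines [0] 0
  let lo := pvSearch starts position 0 lines.length
  let s := PySem.List.pyGetD starts (lo : Int) 0
  if lo < lines.length ∧ s ≤ position ∧
      position ≤ s + (PySem.Str.len (PySem.List.pyGetD lines (lo : Int) "") : Int) then
    ((lo : Int) + 1, position - s)
  else (-1, -1)

-- ===== PRECONDITION & SPEC =====
def Spec_get_line_and_column (text : String) (position : Int) (out : Int × Int) : Prop := out = get_line_and_column_alt text position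
instance (text : String) (position : Int) (out : Int × Int) : Decidable (Spec_get_line_and_column text position out) := by unfold Spec_get_line_and_column; infer_instance

-- ===== CLAIM (what is proved, stated in full; the proofs are below) =====
def Claim_equal_get_line_and_column : Prop := ∀ (text : String) (position : Int), Dom_get_line_and_column text position → Spec_get_line_and_column text position (get_line_and_column text position)

-- ===== LEMMAS AND PROOFS =====

-- pure view of the prefix table: the tail of starts, from base s
def pvOffsets : Int → List String → List Int
  | _, [] => []
  | s, l :: ls =>
      (s + (PySem.Str.len l : Int) + 1) :: pvOffsets (s + (PySem.Str.len l : Int) + 1) ls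

-- start offset of line k, base s (clamped past the end)
def pvStartOf : Int → List String → Nat → Int
  | s, _, 0 => s
  | s, [], _+1 => s
  | s, l :: ls, k+1 => pvStartOf (s + (PySem.Str.len l : Int) + 1) ls k

theorem pvBuild_eq (lns : List String) : ∀ (acc : List Int) (last : Int),
    pvBuild lns acc last = acc ++ pvOffsets last lns := by
  induction lns with
  | nil => intro acc last; simp [pvBuild, pvOffsets]
  | cons l ls ih =>
      intro acc last
      simp [pvBuild, pvOffsets, ih, List.append_assoc]

theorem pvStartOf_ge (lns : List String) : ∀ (s : Int) (k : Nat), s ≤ pvStartOf s lns k := by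
  induction lns with
  | nil => intro s k; cases k <;> simp [pvStartOf]
  | cons l ls ih =>
      intro s k
      cases k with
      | zero => simp [pvStartOf]
      | succ k =>
          have := ih (s + (PySem.Str.len l : Int) + 1) k
          simp only [pvStartOf]
          have hl : (0 : Int) ≤ (PySem.Str.len l : Int) := Int.natCast_nonneg _
          omega

theorem pvStartOf_succ (lns : List String) : ∀ (s : Int) (k : Nat), k < lns.length →
    pvStartOf s lns (k+1) =
      pvStartOf s lns k + (PySem.Str.len (lns.getD k "") : Int) + 1 := by
  induction lns with
  | nil => intro s k h; simp at h
  | cons l ls ih =>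
      intro s k h
      cases k with
      | zero => simp [pvStartOf]
      | succ k =>
          simp only [pvStartOf, List.getD_cons_succ]
          exact ih _ k (by simpa using h)

theorem pvStarts_getD (lns : List String) : ∀ (s : Int) (k : Nat), k ≤ lns.length →
    (s :: pvOffsets s lns).getD k 0 = pvStartOf s lns k := by
  induction lns with
  | nil =>
      intro s k h
      cases k with
      | zero => simp [pvOffsets, pvStartOf]
      | succ k => simp at h
  | cons l ls ih =>
      intro s k h
      cases k with
      | zero => simp [pvStartOf]
      | succ k =>
          simp only [pvOffsets, pvStartOf, List.getD_cons_succ]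
          exact ih _ k (by simpa using h)

theorem pvALoop_low (position : Int) (lns : List String) : ∀ (i s : Int),
    position < s → pvALoop position lns i s = (-1, -1) := by
  induction lns with
  | nil => intro i s _; rfl
  | cons l ls ih =>
      intro i s h
      have hl : (0 : Int) ≤ (PySem.Str.len l : Int) := Int.natCast_nonneg _
      simp only [pvALoop]
      rw [if_neg (by omega)]
      exact ih _ _ (by omega)

theorem pvALoop_high (position : Int) (lns : List String) : ∀ (i s : Int),
    pvStartOf s lns lns.length ≤ position → pvALoop position lns i s = (-1, -1) := by
  induction lns with
  | nil => intro i s _; rfl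
  | cons l ls ih =>
      intro i s h
      simp only [List.length_cons, pvStartOf] at h
      have hge := pvStartOf_ge ls (s + (PySem.Str.len l : Int) + 1) ls.length
      simp only [pvALoop]
      rw [if_neg (by omega)]
      exact ih _ _ h

theorem pvALoop_found (position : Int) (lns : List String) : ∀ (k : Nat) (i s : Int),
    k < lns.length → pvStartOf s lns k ≤ position → position < pvStartOf s lns (k+1) →
    pvALoop position lns i s = (i + (k : Int), position - pvStartOf s lns k) := by
  induction lns with
  | nil => intro k i s h; simp at h
  | cons l ls ih =>
      intro k i s hk hlo hhi
      cases k with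
      | zero =>
          simp only [pvStartOf] at hlo hhi
          have hge := pvStartOf_ge ls (s + (PySem.Str.len l : Int) + 1) 0
          simp only [pvStartOf] at hge
          simp only [pvALoop]
          rw [if_pos (by omega)]
          simp [pvStartOf]
      | succ k =>
          simp only [pvStartOf] at hlo hhi
          have hge := pvStartOf_ge ls (s + (PySem.Str.len l : Int) + 1) k
          simp only [pvALoop]
          rw [if_neg (by omega)]
          rw [ih k (i+1) _ (by simpa using hk) hlo hhi]
          simp only [pvStartOf, Prod.mk.injEq]
          constructor
          · push_cast; ring
          · trivial

theorem pvSearch_spec (starts : List Int) (position : Int) : ∀ (lo hi : Nat), lo ≤ hi →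
    lo ≤ pvSearch starts position lo hi ∧ pvSearch starts position lo hi ≤ hi ∧
    (starts.getD (pvSearch starts position lo hi) 0 ≤ position ∨ pvSearch starts position lo hi = lo) ∧
    (position < starts.getD (pvSearch starts position lo hi + 1) 0 ∨ pvSearch starts position lo hi = hi) := by
  intro lo hi
  induction hd : hi - lo using Nat.strong_induction_on generalizing lo hi with
  | _ d ihd =>
  intro hle
  rw [pvSearch]
  by_cases h : lo < hi
  · rw [if_pos h]
    simp only []
    set mid := (lo + hi) / 2 with hmid
    have h1 : lo ≤ mid := by omega
    have h2 : mid < hi := by omega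
    have hcast : ((mid : Int) + 1) = ((mid + 1 : Nat) : Int) := by push_cast; ring
    by_cases hc : PySem.List.pyGetD starts ((mid : Int) + 1) 0 ≤ position
    · rw [if_pos hc]
      have hrec := ihd (hi - (mid + 1)) (by omega) (mid + 1) hi rfl (by omega)
      rcases hrec with ⟨a, b, c, d'⟩
      refine ⟨by omega, b, ?_, d'⟩
      rcases c with c | c
      · exact Or.inl c
      · left; rw [c]
        rw [hcast, PySem.List.pyGetD_natCast] at hc
        exact hc
    · rw [if_neg hc]
      rw [hcast, PySem.List.pyGetD_natCast] at hc
      have hrec := ihd (mid - lo) (by omega) lo mid rfl (by omega)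
      rcases hrec with ⟨a, b, c, d'⟩
      refine ⟨a, by omega, c, ?_⟩
      rcases d' with d' | d'
      · exact Or.inl d'
      · left; rw [d']; omega
  · rw [if_neg h]
    have : lo = hi := by omega
    exact ⟨le_refl _, by omega, Or.inr rfl, Or.inr this⟩

-- ===== VERDICT (by name: the statement is the Claim_ definition above) =====
theorem get_line_and_column_spec : Claim_equal_get_line_and_column := by
  intro text position _
  unfold Spec_get_line_and_column get_line_and_column get_line_and_column_alt
  set lns := PySem.Str.splitlines text with hlns
  set n := lns.length with hn
  have hstarts : pvBuild lns [0] 0 = 0 :: pvOffsets 0 lns := by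
    rw [pvBuild_eq]; rfl
  simp only [hstarts]
  set starts := (0 : Int) :: pvOffsets 0 lns with hst
  set r := pvSearch starts position 0 n with hr
  obtain ⟨hr0, hrn, hc2, hc3⟩ := pvSearch_spec starts position 0 n (Nat.zero_le _)
  rw [← hr] at hc2 hc3 hrn
  have hgetD : ∀ k : Nat, k ≤ n → starts.getD k 0 = pvStartOf 0 lns k := fun k hk =>
    pvStarts_getD lns 0 k hk
  by_cases hlt : r < n
  · -- r is a valid line index; pos < startOf (r+1) from the search
    have h3 : position < pvStartOf 0 lns (r + 1) := by
      rcases hc3 with h | h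
      · rw [hgetD (r+1) (by omega)] at h; exact h
      · omega
    have hsucc := pvStartOf_succ lns 0 r hlt
    have hsr : PySem.List.pyGetD starts (r : Int) 0 = pvStartOf 0 lns r := by
      rw [PySem.List.pyGetD_natCast]; exact hgetD r (by omega)
    have hlr : PySem.List.pyGetD lns (r : Int) "" = lns.getD r "" := by
      rw [PySem.List.pyGetD_natCast]
    by_cases hge : pvStartOf 0 lns r ≤ position
    · -- found: both return (r+1, position - startOf r)
      rw [if_pos ⟨hlt, by rw [hsr]; exact hge, by rw [hsr, hlr]; omega⟩]
      rw [pvALoop_found position lns r 1 0 hlt hge h3, hsr]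
      rw [Int.add_comm]
    · -- position < starts[r]: only possible with r = 0, i.e. position < 0
      have hr0' : r = 0 := by
        rcases hc2 with h | h
        · rw [hgetD r (by omega)] at h; omega
        · exact h
      rw [if_neg (by rw [hsr]; tauto)]
      rw [pvALoop_low position lns 1 0 (by rw [hr0'] at hge; simpa [pvStartOf] using hge)]
  · -- r = n: position is past the last line (or before a nonexistent one)
    have hrn' : r = n := by omega
    rw [if_neg (by tauto)]
    rcases hc2 with h | h
    · rw [hgetD r (by omega), hrn'] at h
      rw [pvALoop_high position lns 1 0 h]
    · -- r = 0 = n : no lines at all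
      have : n = 0 := by omega
      have : lns = [] := List.length_eq_zero_iff.mp (by omega)
      rw [this]; rfl
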